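-- pv_equiv track=rewrite | github.com/aquaphoenix1/PythonTensor | PythonTensor/CharacteristicCalculators/Plotter.py | countInIntervals
-- ===== SOURCE A (Python) =====
-- def countInIntervals(data, intervals):
--     res = [0] * (len(intervals) - 1)
--     for i in data:
--         for j in range(len(intervals)-1):
--             if i >= intervals[j] and i <= intervals[j+1]:
--                 res[j] = res[j] + 1
--                 break
--
--     return res
-- ===== SOURCE B (Python) =====
-- def countInIntervals(data, intervals):
--     remaining = list(data)
--     res = []
--     for lo, hi in zip(intervals, intervals[1:]):
--         c = 0
--         kept = []
--         for x in remaining: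
--             if lo <= x <= hi:
--                 c += 1
--             else:
--                 kept.append(x)
--         remaining = kept
--         res.append(c)
--     return res
-- ===== Notes on version B (the rewrite author's own statement) =====
-- stated objective: alternative
-- what changed: Interval-major instead of point-major: B walks the interval pairs once, counting the still-unassigned points in each pair and removing them from the remaining pool, instead of A's per-point inner scan with break over the intervals.
import Mathlib
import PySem

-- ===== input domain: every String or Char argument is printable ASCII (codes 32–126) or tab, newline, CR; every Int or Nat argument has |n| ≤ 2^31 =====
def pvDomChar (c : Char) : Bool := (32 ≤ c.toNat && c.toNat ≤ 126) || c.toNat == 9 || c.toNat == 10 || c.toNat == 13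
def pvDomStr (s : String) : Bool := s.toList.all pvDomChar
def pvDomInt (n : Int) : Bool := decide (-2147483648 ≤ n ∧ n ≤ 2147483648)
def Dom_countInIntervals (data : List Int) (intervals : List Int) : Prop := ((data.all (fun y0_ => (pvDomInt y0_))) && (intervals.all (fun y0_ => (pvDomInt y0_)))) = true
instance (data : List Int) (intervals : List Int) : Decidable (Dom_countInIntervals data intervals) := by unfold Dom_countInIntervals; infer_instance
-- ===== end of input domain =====

-- B replaces A's point-major inner scan with break by an interval-major pass that
-- counts and removes the still-unassigned points per interval pair (objective: alternative).

-- ===== PORT A =====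
-- inner 'for j in range(len(intervals)-1): if … : res[j] += 1; break', as a countdown over the remaining j's
def aLoop (i : Int) (intervals : List Int) : Nat → Nat → List Int → List Int
  | 0, _, res => res
  | k + 1, j, res =>
    if intervals.getD j 0 ≤ i ∧ i ≤ intervals.getD (j + 1) 0 then
      res.set j (res.getD j 0 + 1)
    else
      aLoop i intervals k (j + 1) res

def countInIntervals (data : List Int) (intervals : List Int) : List Int :=
  data.foldl (fun res i => aLoop i intervals (intervals.length - 1) 0 res)
    (List.replicate (intervals.length - 1) 0)

-- ===== PORT B =====
def countInIntervals_alt (data : List Int) (intervals : List Int) : List Int :=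
  ((intervals.zip (intervals.drop 1)).foldl
      (fun (st : List Int × List Int) p =>
        let r := st.1.foldl
          (fun (acc : Int × List Int) x =>
            if p.1 ≤ x ∧ x ≤ p.2 then (acc.1 + 1, acc.2) else (acc.1, acc.2 ++ [x]))
          (0, [])
        (r.2, st.2 ++ [r.1]))
      (data, [])).2

-- ===== PRECONDITION & SPEC =====
def Spec_countInIntervals (data : List Int) (intervals : List Int) (out : List Int) : Prop := out = countInIntervals_alt data intervals
instance (data : List Int) (intervals : List Int) (out : List Int) : Decidable (Spec_countInIntervals data intervals out) := by unfold Spec_countInIntervals; infer_instance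

-- ===== CLAIM (what is proved, stated in full; the proofs are below) =====
def Claim_equal_countInIntervals : Prop := ∀ (data : List Int) (intervals : List Int), Dom_countInIntervals data intervals → Spec_countInIntervals data intervals (countInIntervals data intervals)

-- ===== LEMMAS AND PROOFS =====

-- common functional description: per interval pair, the count of points whose FIRST matching pair it is
def specL : List Int → List Int → List Int
  | a :: b :: rest, d =>
      ((d.countP fun x => decide (a ≤ x ∧ x ≤ b)) : Int) ::
        specL (b :: rest) (d.filter fun x => !decide (a ≤ x ∧ x ≤ b))
  | _, _ => []

-- index of the first pair containing x
def fIdx : List Int → Int → Option Nat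
  | a :: b :: rest, x => if a ≤ x ∧ x ≤ b then some 0 else (fIdx (b :: rest) x).map (· + 1)
  | _, _ => none

def bump (l : List Int) (t : Nat) : List Int := l.set t (l.getD t 0 + 1)

-- the step of B's outer fold, named for the proofs
def bStep (st : List Int × List Int) (p : Int × Int) : List Int × List Int :=
  let r := st.1.foldl
    (fun (acc : Int × List Int) x =>
      if p.1 ≤ x ∧ x ≤ p.2 then (acc.1 + 1, acc.2) else (acc.1, acc.2 ++ [x]))
    (0, [])
  (r.2, st.2 ++ [r.1])

lemma specL_nil (s : List Int) : specL s [] = List.replicate (s.length - 1) 0 := by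
  induction s with
  | nil => simp [specL]
  | cons a tail ih =>
    cases tail with
    | nil => simp [specL]
    | cons b rest => simpa [specL, List.replicate_succ] using ih

lemma specL_length (s d : List Int) : (specL s d).length = s.length - 1 := by
  induction s generalizing d with
  | nil => simp [specL]
  | cons a tail ih =>
    cases tail with
    | nil => simp [specL]
    | cons b rest => simp [specL, ih]

lemma specL_cons (s : List Int) (x : Int) (d : List Int) :
    specL s (x :: d) =
      match fIdx s x with
      | some t => bump (specL s d) t
      | none => specL s d := by
  induction s generalizing d with
  | nil => simp [specL, fIdx]
  | cons a tail ih =>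
    cases tail with
    | nil => simp [specL, fIdx]
    | cons b rest =>
      by_cases h : a ≤ x ∧ x ≤ b
      · simp [specL, fIdx, h, bump]
      · have := ih (d := d.filter fun y => !decide (a ≤ y ∧ y ≤ b))
        simp only [specL, fIdx, h, if_false, List.countP_cons, List.filter_cons,
          decide_eq_true_eq]
        cases hf : fIdx (b :: rest) x with
        | none => simp [hf] at this ⊢; simp [this]
        | some t =>
          simp [hf] at this ⊢
          simp [this, bump, List.getD]

lemma bump_swap (a b : List Int) (t : Nat) :
    List.zipWith (· + ·) (bump a t) b = List.zipWith (· + ·) a (bump b t) := by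
  apply List.ext_getElem
  · simp [bump]
  · intro k hk1 hk2
    simp only [bump, List.length_zipWith, List.length_set] at hk1 hk2
    have hka : k < a.length := lt_of_lt_of_le hk1 (min_le_left _ _)
    have hkb : k < b.length := lt_of_lt_of_le hk1 (min_le_right _ _)
    rw [List.getElem_zipWith, List.getElem_zipWith]
    simp only [bump]
    rw [List.getElem_set, List.getElem_set]
    by_cases h : t = k
    · subst h
      simp [List.getElem?_eq_getElem hka, List.getElem?_eq_getElem hkb]
      ring
    · simp [h]

lemma zipWith_zero_left (l : List Int) (n : Nat) (h : l.length = n) :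
    List.zipWith (· + ·) (List.replicate n 0) l = l := by
  induction l generalizing n with
  | nil => simp
  | cons x xs ih =>
    cases n with
    | zero => simp at h
    | succ m => simp_all [List.replicate_succ]

lemma zipWith_zero_right (l : List Int) (n : Nat) (h : l.length = n) :
    List.zipWith (· + ·) l (List.replicate n 0) = l := by
  induction l generalizing n with
  | nil => simp
  | cons x xs ih =>
    cases n with
    | zero => simp at h
    | succ m => simp_all [List.replicate_succ]

lemma aLoop_eq (intervals : List Int) (i : Int) :
    ∀ (s : List Int) (j : Nat) (res : List Int), intervals.drop j = s →
      aLoop i intervals (s.length - 1) j res =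
        match fIdx s i with
        | some t => bump res (j + t)
        | none => res := by
  intro s
  induction s with
  | nil => intro j res h; simp [aLoop, fIdx]
  | cons a tail ih =>
    cases tail with
    | nil => intro j res h; simp [aLoop, fIdx]
    | cons b rest =>
      intro j res h
      have hj : intervals[j]? = some a := by
        have h0 : (List.drop j intervals)[(0 : Nat)]? = some a := by rw [h]; rfl
        rw [List.getElem?_drop] at h0; simpa using h0
      have hj1 : intervals[j + 1]? = some b := by
        have h0 : (List.drop j intervals)[(1 : Nat)]? = some b := by rw [h]; rfl
        rw [List.getElem?_drop] at h0; simpa using h0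
      have hdrop : intervals.drop (j + 1) = b :: rest := by
        have h1 : intervals.drop (j + 1) = (intervals.drop j).drop 1 := by
          rw [List.drop_drop]
        rw [h1, h]; simp
      show aLoop i intervals (rest.length + 1) j res = _
      by_cases hc : a ≤ i ∧ i ≤ b
      · simp [aLoop, List.getD, hj, hj1, hc, fIdx, bump]
      · have := ih (j + 1) res hdrop
        simp only [List.length_cons, Nat.add_sub_cancel] at this
        simp only [aLoop, List.getD, hj, hj1, Option.getD_some, hc, if_false, this, fIdx]
        cases hf : fIdx (b :: rest) i with
        | none => simp
        | some t => simp; congr 1; omega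

lemma A_fold (intervals d : List Int) :
    ∀ res : List Int, res.length = intervals.length - 1 →
      d.foldl (fun r i => aLoop i intervals (intervals.length - 1) 0 r) res
        = List.zipWith (· + ·) res (specL intervals d) := by
  induction d with
  | nil =>
    intro res hlen
    rw [List.foldl_nil, specL_nil, zipWith_zero_right res _ hlen]
  | cons x xs ih =>
    intro res hlen
    rw [List.foldl_cons]
    have hstep := aLoop_eq intervals x intervals 0 res rfl
    rw [specL_cons]
    cases hf : fIdx intervals x with
    | none =>
      simp only [hf] at hstep ⊢
      rw [hstep, ih res hlen]
    | some t =>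
      simp only [hf, Nat.zero_add] at hstep ⊢
      rw [hstep, ih (bump res t) (by simp [bump, hlen]), bump_swap]

lemma A_eq_specL (data intervals : List Int) :
    countInIntervals data intervals = specL intervals data := by
  unfold countInIntervals
  rw [A_fold intervals data _ (by simp)]
  exact zipWith_zero_left _ _ (specL_length intervals data)

lemma B_inner (a b : Int) (d : List Int) :
    ∀ (c : Int) (ks : List Int),
      d.foldl (fun acc x => if a ≤ x ∧ x ≤ b then (acc.1 + 1, acc.2) else (acc.1, acc.2 ++ [x])) (c, ks)
        = (c + ((d.countP fun x => decide (a ≤ x ∧ x ≤ b)) : Int),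
           ks ++ d.filter fun x => !decide (a ≤ x ∧ x ≤ b)) := by
  induction d with
  | nil => simp
  | cons x xs ih =>
    intro c ks
    by_cases h : a ≤ x ∧ x ≤ b
    · simp only [List.foldl_cons, if_pos h, ih, List.countP_cons, List.filter_cons]
      simp [h]; ring
    · simp only [List.foldl_cons, if_neg h, ih, List.countP_cons, List.filter_cons]
      simp [h]

lemma bStep_eq (d acc : List Int) (a b : Int) :
    bStep (d, acc) (a, b)
      = (d.filter fun x => !decide (a ≤ x ∧ x ≤ b),
         acc ++ [((d.countP fun x => decide (a ≤ x ∧ x ≤ b)) : Int)]) := by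
  simp [bStep, B_inner]

lemma B_outer :
    ∀ (iv d acc : List Int),
      ((iv.zip (iv.drop 1)).foldl bStep (d, acc)).2 = acc ++ specL iv d := by
  intro iv
  induction iv with
  | nil => simp [specL]
  | cons a tail ih =>
    cases tail with
    | nil => simp [specL]
    | cons b rest =>
      intro d acc
      have hz : (a :: b :: rest).zip ((a :: b :: rest).drop 1)
          = (a, b) :: ((b :: rest).zip ((b :: rest).drop 1)) := by simp
      rw [hz, List.foldl_cons, bStep_eq, ih]
      simp [specL]

lemma B_eq_specL (data intervals : List Int) :
    countInIntervals_alt data intervals = specL intervals data := by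
  have h : countInIntervals_alt data intervals
      = ((intervals.zip (intervals.drop 1)).foldl bStep (data, [])).2 := rfl
  rw [h, B_outer]
  simp

-- ===== VERDICT (by name: the statement is the Claim_ definition above) =====
theorem countInIntervals_spec : Claim_equal_countInIntervals := by
  intro data intervals _
  unfold Spec_countInIntervals
  rw [A_eq_specL, B_eq_specL]
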